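-- pv_equiv track=rewrite | github.com/pfptcommunity/senderstats | src/senderstats/common/address_parser.py | _find_angle_pair_outside_quotes
-- ===== SOURCE A (Python) =====
-- from typing import Dict, Tuple, Iterable, List
--
-- def _find_angle_pair_outside_quotes(s: str) -> Tuple[int, int]:
--     in_quotes = False
--     escape = False
--     lt = -1
--     gt = -1
--
--     for i, ch in enumerate(s):
--         if escape:
--             escape = False
--             continue
--         if ch == "\\":
--             escape = True
--             continue
--         if ch == '"':
--             in_quotes = not in_quotes
--             continue
--         if not in_quotes:
--             if ch == "<":
--                 lt = i
--                 gt = -1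
--             elif ch == ">" and lt != -1:
--                 gt = i
--
--     return lt, gt
-- ===== SOURCE B (Python) =====
-- def _find_angle_pair_outside_quotes(s):
--     # Phase 1: one pass collecting the indices of all unquoted, unescaped
--     # '<' and '>' characters (in order), instead of updating lt/gt inline.
--     marks = []
--     in_quotes = False
--     escape = False
--     for i, ch in enumerate(s):
--         if escape:
--             escape = False
--         elif ch == "\\":
--             escape = True
--         elif ch == '"':
--             in_quotes = not in_quotes
--         elif not in_quotes and (ch == "<" or ch == ">"):
--             marks.append((i, ch))
--     # Phase 2: scan the collected marks from the end: the first '<' seen is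
--     # the last '<' overall; the first '>' seen before it is the last '>'
--     # after that '<'.
--     lt = -1
--     gt = -1
--     for i, ch in reversed(marks):
--         if ch == "<":
--             lt = i
--             break
--         if gt == -1:
--             gt = i
--     if lt == -1:
--         gt = -1
--     return lt, gt
-- ===== Notes on version B (the rewrite author's own statement) =====
-- stated objective: alternative
-- what changed: B splits the work into two phases: a pass that only collects the indices of unquoted '<'/'>' characters, then a backward scan over those marks that stops at the first '<' from the end, instead of A's inline lt/gt state updates with reset.
import Mathlib
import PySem

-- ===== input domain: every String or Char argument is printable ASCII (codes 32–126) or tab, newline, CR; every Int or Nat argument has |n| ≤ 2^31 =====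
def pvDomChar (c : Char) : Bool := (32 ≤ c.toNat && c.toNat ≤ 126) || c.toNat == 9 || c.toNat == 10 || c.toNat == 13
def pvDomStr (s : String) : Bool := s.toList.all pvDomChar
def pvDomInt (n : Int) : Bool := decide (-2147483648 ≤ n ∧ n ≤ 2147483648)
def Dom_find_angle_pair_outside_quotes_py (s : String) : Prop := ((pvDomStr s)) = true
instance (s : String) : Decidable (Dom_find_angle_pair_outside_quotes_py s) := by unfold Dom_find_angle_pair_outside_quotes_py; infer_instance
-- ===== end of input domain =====

-- B collects the unquoted '<'/'>' indices in one pass and then scans them backward; same result, a different decomposition (no speed claim).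

-- ===== PORT A =====
-- loop body of A's for-loop; state (in_quotes, escape, lt, gt)
def pvStepA (st : Bool × Bool × Int × Int) (p : Int × Char) : Bool × Bool × Int × Int :=
  let q := st.1; let e := st.2.1; let lt := st.2.2.1; let gt := st.2.2.2
  let i := p.1; let ch := p.2
  if e then (q, false, lt, gt)
  else if ch = '\\' then (q, true, lt, gt)
  else if ch = '"' then (!q, e, lt, gt)
  else if !q then
    if ch = '<' then (q, e, i, -1)
    else if ch = '>' ∧ lt ≠ -1 then (q, e, lt, i)
    else (q, e, lt, gt)
  else (q, e, lt, gt)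

def find_angle_pair_outside_quotes_py (s : String) : Int × Int :=
  let st := (PySem.List.enumerate s.toList).foldl pvStepA (false, false, -1, -1)
  (st.2.2.1, st.2.2.2)

-- ===== PORT B =====
-- loop body of Source B's first (collecting) loop; state (in_quotes, escape, marks)
def pvStepB (st : Bool × Bool × List (Int × Char)) (p : Int × Char) : Bool × Bool × List (Int × Char) :=
  let q := st.1; let e := st.2.1; let ms := st.2.2
  let i := p.1; let ch := p.2
  if e then (q, false, ms)
  else if ch = '\\' then (q, true, ms)
  else if ch = '"' then (!q, e, ms)
  else if !q ∧ (ch = '<' ∨ ch = '>') then (q, e, ms ++ [(i, ch)])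
  else (q, e, ms)

-- phase 1 of Source B: collect (index, char) of every unquoted, unescaped '<' or '>'
def pvMarksB (s : String) : List (Int × Char) :=
  ((PySem.List.enumerate s.toList).foldl pvStepB (false, false, [])).2.2

-- phase 2 of Source B: the backward for-loop with break over reversed(marks)
def pvBackLoopB : List (Int × Char) → Int → Int × Int
  | [], gt => (-1, gt)
  | (i, ch) :: rest, gt =>
    if ch = '<' then (i, gt)
    else pvBackLoopB rest (if gt = -1 then i else gt)

def find_angle_pair_outside_quotes_py_alt (s : String) : Int × Int :=
  let r := pvBackLoopB (pvMarksB s).reverse (-1)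
  if r.1 = -1 then (-1, -1) else (r.1, r.2)

-- ===== PRECONDITION & SPEC =====
def Spec_find_angle_pair_outside_quotes_py (s : String) (out : Int × Int) : Prop := out = find_angle_pair_outside_quotes_py_alt s
instance (s : String) (out : Int × Int) : Decidable (Spec_find_angle_pair_outside_quotes_py s out) := by unfold Spec_find_angle_pair_outside_quotes_py; infer_instance

-- ===== CLAIM (what is proved, stated in full; the proofs are below) =====
def Claim_equal_find_angle_pair_outside_quotes_py : Prop := ∀ (s : String), Dom_find_angle_pair_outside_quotes_py s → Spec_find_angle_pair_outside_quotes_py s (find_angle_pair_outside_quotes_py s)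

-- ===== LEMMAS AND PROOFS =====

-- the pure (lt, gt) update A performs on a collected mark
def pvStep (p : Int × Int) (m : Int × Char) : Int × Int :=
  if m.2 = '<' then (m.1, -1)
  else if m.2 = '>' ∧ p.1 ≠ -1 then (p.1, m.1)
  else p

-- the marks the scanning loop emits when started in state (q, e)
def pvMarksOf : List (Int × Char) → Bool → Bool → List (Int × Char)
  | [], _, _ => []
  | (i, ch) :: l, q, e =>
    if e then pvMarksOf l q false
    else if ch = '\\' then pvMarksOf l q true
    else if ch = '"' then pvMarksOf l (!q) e
    else if !q ∧ (ch = '<' ∨ ch = '>') then (i, ch) :: pvMarksOf l q e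
    else pvMarksOf l q e

theorem pvA_fold (l : List (Int × Char)) : ∀ (q e : Bool) (lt gt : Int),
    (l.foldl pvStepA (q, e, lt, gt)).2.2 = List.foldl pvStep (lt, gt) (pvMarksOf l q e) := by
  induction l with
  | nil => intro q e lt gt; simp [pvMarksOf]
  | cons hd tl ih =>
    intro q e lt gt
    obtain ⟨i, ch⟩ := hd
    rw [List.foldl_cons]
    by_cases he : e = true
    · rw [show pvStepA (q, e, lt, gt) (i, ch) = (q, false, lt, gt) by simp [pvStepA, he],
          show pvMarksOf ((i, ch) :: tl) q e = pvMarksOf tl q false by simp [pvMarksOf, he]]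
      exact ih q false lt gt
    · have he' : e = false := by simpa using he
      by_cases hbs : ch = '\\'
      · rw [show pvStepA (q, e, lt, gt) (i, ch) = (q, true, lt, gt) by simp [pvStepA, he', hbs],
            show pvMarksOf ((i, ch) :: tl) q e = pvMarksOf tl q true by simp [pvMarksOf, he', hbs]]
        exact ih q true lt gt
      · by_cases hq : ch = '"'
        · rw [show pvStepA (q, e, lt, gt) (i, ch) = (!q, e, lt, gt) by simp [pvStepA, he', hq],
              show pvMarksOf ((i, ch) :: tl) q e = pvMarksOf tl (!q) e by simp [pvMarksOf, he', hq]]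
          exact ih (!q) e lt gt
        · by_cases hv : q = false
          · by_cases hlt : ch = '<'
            · rw [show pvStepA (q, e, lt, gt) (i, ch) = (q, e, i, -1) by simp [pvStepA, he', hv, hlt],
                  show pvMarksOf ((i, ch) :: tl) q e = (i, ch) :: pvMarksOf tl q e by simp [pvMarksOf, he', hbs, hq, hv, hlt],
                  List.foldl_cons,
                  show pvStep (lt, gt) (i, ch) = (i, -1) by simp [pvStep, hlt]]
              exact ih q e i (-1)
            · by_cases hgt : ch = '>'
              · by_cases hl : lt = -1
                · rw [show pvStepA (q, e, lt, gt) (i, ch) = (q, e, lt, gt) by simp [pvStepA, he', hbs, hq, hv, hlt, hgt, hl],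
                      show pvMarksOf ((i, ch) :: tl) q e = (i, ch) :: pvMarksOf tl q e by simp [pvMarksOf, he', hbs, hq, hv, hgt],
                      List.foldl_cons,
                      show pvStep (lt, gt) (i, ch) = (lt, gt) by simp [pvStep, hlt, hgt, hl]]
                  exact ih q e lt gt
                · rw [show pvStepA (q, e, lt, gt) (i, ch) = (q, e, lt, i) by simp [pvStepA, he', hbs, hq, hv, hlt, hgt, hl],
                      show pvMarksOf ((i, ch) :: tl) q e = (i, ch) :: pvMarksOf tl q e by simp [pvMarksOf, he', hbs, hq, hv, hgt],
                      List.foldl_cons,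
                      show pvStep (lt, gt) (i, ch) = (lt, i) by simp [pvStep, hlt, hgt, hl]]
                  exact ih q e lt i
              · rw [show pvStepA (q, e, lt, gt) (i, ch) = (q, e, lt, gt) by simp [pvStepA, he', hbs, hq, hv, hlt, hgt],
                    show pvMarksOf ((i, ch) :: tl) q e = pvMarksOf tl q e by simp [pvMarksOf, he', hbs, hq, hlt, hgt]]
                exact ih q e lt gt
          · have hv' : q = true := by simpa using hv
            rw [show pvStepA (q, e, lt, gt) (i, ch) = (q, e, lt, gt) by simp [pvStepA, he', hbs, hq, hv'],
                show pvMarksOf ((i, ch) :: tl) q e = pvMarksOf tl q e by simp [pvMarksOf, he', hbs, hq, hv']]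
            exact ih q e lt gt

theorem pvB_fold (l : List (Int × Char)) : ∀ (q e : Bool) (ms : List (Int × Char)),
    (l.foldl pvStepB (q, e, ms)).2.2 = ms ++ pvMarksOf l q e := by
  induction l with
  | nil => intro q e ms; simp [pvMarksOf]
  | cons hd tl ih =>
    intro q e ms
    obtain ⟨i, ch⟩ := hd
    rw [List.foldl_cons]
    by_cases he : e = true
    · rw [show pvStepB (q, e, ms) (i, ch) = (q, false, ms) by simp [pvStepB, he],
          show pvMarksOf ((i, ch) :: tl) q e = pvMarksOf tl q false by simp [pvMarksOf, he]]
      exact ih q false ms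
    · have he' : e = false := by simpa using he
      by_cases hbs : ch = '\\'
      · rw [show pvStepB (q, e, ms) (i, ch) = (q, true, ms) by simp [pvStepB, he', hbs],
            show pvMarksOf ((i, ch) :: tl) q e = pvMarksOf tl q true by simp [pvMarksOf, he', hbs]]
        exact ih q true ms
      · by_cases hq : ch = '"'
        · rw [show pvStepB (q, e, ms) (i, ch) = (!q, e, ms) by simp [pvStepB, he', hq],
              show pvMarksOf ((i, ch) :: tl) q e = pvMarksOf tl (!q) e by simp [pvMarksOf, he', hq]]
          exact ih (!q) e ms
        · by_cases hm : q = false ∧ (ch = '<' ∨ ch = '>')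
          · rw [show pvStepB (q, e, ms) (i, ch) = (q, e, ms ++ [(i, ch)]) by simp [pvStepB, he', hbs, hq, hm.1, hm.2],
                show pvMarksOf ((i, ch) :: tl) q e = (i, ch) :: pvMarksOf tl q e by simp [pvMarksOf, he', hbs, hq, hm.1, hm.2],
                ih q e (ms ++ [(i, ch)])]
            simp
          · have hm' : ¬((!q) = true ∧ (ch = '<' ∨ ch = '>')) := by
              simpa [Bool.not_eq_true] using hm
            rw [show pvStepB (q, e, ms) (i, ch) = (q, e, ms) by
                  simp only [pvStepB]; rw [if_neg (by simp [he']), if_neg hbs, if_neg hq, if_neg hm'],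
                show pvMarksOf ((i, ch) :: tl) q e = pvMarksOf tl q e by
                  simp only [pvMarksOf]; rw [if_neg (by simp [he']), if_neg hbs, if_neg hq, if_neg hm']]
            exact ih q e ms

theorem pvStep_inv (l : List (Int × Char)) : ∀ (p : Int × Int), (p.1 = -1 → p.2 = -1) →
    ((List.foldl pvStep p l).1 = -1 → (List.foldl pvStep p l).2 = -1) := by
  induction l with
  | nil => intro p hp; exact hp
  | cons m rest ih =>
    intro p hp
    apply ih
    unfold pvStep
    split_ifs with h1 h2
    · simp
    · intro h; exact absurd h h2.2
    · exact hp

theorem pvMarksOf_ok (l : List (Int × Char)) : ∀ (q e : Bool),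
    (∀ p ∈ l, 0 ≤ p.1) → ∀ m ∈ pvMarksOf l q e, 0 ≤ m.1 ∧ (m.2 = '<' ∨ m.2 = '>') := by
  induction l with
  | nil => intro q e _ m hm; simp [pvMarksOf] at hm
  | cons hd tl ih =>
    intro q e hl m hm
    obtain ⟨i, ch⟩ := hd
    have htl : ∀ p ∈ tl, 0 ≤ p.1 := fun p hp => hl p (List.mem_cons_of_mem _ hp)
    simp only [pvMarksOf] at hm
    split_ifs at hm with h1 h2 h3 h4
    · exact ih q false htl m hm
    · exact ih q true htl m hm
    · exact ih (!q) e htl m hm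
    · rcases List.mem_cons.mp hm with h | h
      · subst h; exact ⟨hl (i, ch) List.mem_cons_self, h4.2⟩
      · exact ih q e htl m h
    · exact ih q e htl m hm

-- the '>' step of the backward scan, over an abstract fold state r
theorem pvBack_step (r : Int × Int) (g i : Int) (hi : i ≠ -1) (hinv : r.1 = -1 → r.2 = -1) :
    (if r.1 = -1 then ((-1 : Int), (-1 : Int))
     else (r.1, if (if g = -1 then i else g) ≠ -1 then (if g = -1 then i else g) else r.2))
    = (if (pvStep r (i, '>')).1 = -1 then ((-1 : Int), (-1 : Int))
       else ((pvStep r (i, '>')).1, if g ≠ -1 then g else (pvStep r (i, '>')).2)) := by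
  by_cases hr1 : r.1 = -1
  · simp [pvStep, hr1]
  · by_cases hg : g = -1 <;> simp [pvStep, hr1, hg, hi]

-- phase 2 on the reversed marks, with the final lt = -1 fixup, equals A's fold over the marks
theorem pvBack_eq (rl : List (Int × Char)) : ∀ (g : Int),
    (∀ m ∈ rl, 0 ≤ m.1 ∧ (m.2 = '<' ∨ m.2 = '>')) →
    (let r := pvBackLoopB rl g
     if r.1 = -1 then ((-1 : Int), (-1 : Int)) else (r.1, r.2))
    = (let r := List.foldl pvStep ((-1 : Int), (-1 : Int)) rl.reverse
       if r.1 = -1 then ((-1 : Int), (-1 : Int)) else (r.1, if g ≠ -1 then g else r.2)) := by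
  induction rl with
  | nil => intro g _; simp [pvBackLoopB]
  | cons hd rest ih =>
    intro g hok
    obtain ⟨i, ch⟩ := hd
    have hhd := hok (i, ch) List.mem_cons_self
    have hrest : ∀ m ∈ rest, 0 ≤ m.1 ∧ (m.2 = '<' ∨ m.2 = '>') :=
      fun m hm => hok m (List.mem_cons_of_mem _ hm)
    have hi : (i : Int) ≠ -1 := by have := hhd.1; omega
    have hinv : (List.foldl pvStep ((-1 : Int), (-1 : Int)) rest.reverse).1 = -1 →
        (List.foldl pvStep ((-1 : Int), (-1 : Int)) rest.reverse).2 = -1 :=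
      pvStep_inv _ _ (fun _ => rfl)
    rw [List.reverse_cons, List.foldl_append]
    rcases hhd.2 with hlt | hgt
    · -- ch = '<'
      subst hlt
      by_cases hg : g = -1 <;> simp [pvBackLoopB, pvStep, hi, hg]
    · -- ch = '>'
      subst hgt
      have hne : ('>' : Char) ≠ '<' := by decide
      simp only [pvBackLoopB, if_neg hne]
      rw [ih _ hrest]
      exact pvBack_step (List.foldl pvStep ((-1 : Int), (-1 : Int)) rest.reverse) g i hi hinv

theorem pvEnum_nonneg (s : String) : ∀ p ∈ PySem.List.enumerate s.toList 0, 0 ≤ p.1 := by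
  intro p hp
  rw [PySem.List.mem_enumerate_iff] at hp
  obtain ⟨k, hk, rfl⟩ := hp
  simp

-- ===== VERDICT (by name: the statement is the Claim_ definition above) =====
theorem find_angle_pair_outside_quotes_py_spec : Claim_equal_find_angle_pair_outside_quotes_py := by
  intro s _
  unfold Spec_find_angle_pair_outside_quotes_py
  unfold find_angle_pair_outside_quotes_py find_angle_pair_outside_quotes_py_alt pvMarksB
  rw [pvB_fold (PySem.List.enumerate s.toList) false false []]
  simp only [List.nil_append]
  have hok' : ∀ m ∈ (pvMarksOf (PySem.List.enumerate s.toList) false false).reverse,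
      0 ≤ m.1 ∧ (m.2 = '<' ∨ m.2 = '>') := by
    intro m hm
    exact pvMarksOf_ok (PySem.List.enumerate s.toList) false false (pvEnum_nonneg s) m
      (List.mem_reverse.mp hm)
  have hback := pvBack_eq (pvMarksOf (PySem.List.enumerate s.toList) false false).reverse (-1) hok'
  simp only [List.reverse_reverse, ne_eq, not_true_eq_false, if_false] at hback
  rw [pvA_fold]
  rw [hback]
  have hinv := pvStep_inv (pvMarksOf (PySem.List.enumerate s.toList) false false)
    ((-1 : Int), (-1 : Int)) (fun _ => rfl)
  by_cases h1 : (List.foldl pvStep ((-1 : Int), (-1 : Int))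
      (pvMarksOf (PySem.List.enumerate s.toList) false false)).1 = -1
  · simp [h1, hinv h1]
  · simp [h1]
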